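-- pv_equiv track=rewrite | github.com/touge13/Algorithms | TrainingAlgorithms6.0/2 (полный балл)/I.py | study_of_algorithms
-- ===== SOURCE A (Python) =====
-- def study_of_algorithms(n, a, b, mood):
--     algorithms = [(i + 1, a[i], b[i]) for i in range(n)]
--     interest_sorted = sorted(algorithms, key=lambda x: (-x[1], -x[2], x[0]))
--     usefulness_sorted = sorted(algorithms, key=lambda x: (-x[2], -x[1], x[0]))
--
--     interest_index = 0
--     usefulness_index = 0
--     studied = set()
--     result = []
--
--     for mood_today in mood:
--         if mood_today == 1:
--             while usefulness_index < n and usefulness_sorted[usefulness_index][0] in studied: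
--                 usefulness_index += 1
--             current_algorithm = usefulness_sorted[usefulness_index]
--             usefulness_index += 1
--         else:
--             while interest_index < n and interest_sorted[interest_index][0] in studied:
--                 interest_index += 1
--             current_algorithm = interest_sorted[interest_index]
--             interest_index += 1
--         studied.add(current_algorithm[0])
--         result.append(current_algorithm[0])
--     return result
-- ===== SOURCE B (Python) =====
-- def study_of_algorithms(n, a, b, mood):
--     algorithms = [(i + 1, a[i], b[i]) for i in range(n)]
--     by_interest = sorted(algorithms, key=lambda x: (-x[1], -x[2], x[0]))
--     by_usefulness = sorted(algorithms, key=lambda x: (-x[2], -x[1], x[0]))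
--
--     studied = set()
--     result = []
--     for mood_today in mood:
--         lst = by_usefulness if mood_today == 1 else by_interest
--         pick = next(t for t in lst if t[0] not in studied)
--         studied.add(pick[0])
--         result.append(pick[0])
--     return result
-- ===== Notes on version B (the rewrite author's own statement) =====
-- stated objective: alternative
-- what changed: Replaces A's two persistent skip-pointers (amortized single forward pass over each presorted list) with a stateless per-day rescan of the relevant presorted list from index 0 for the first unstudied id.
import Mathlib
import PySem

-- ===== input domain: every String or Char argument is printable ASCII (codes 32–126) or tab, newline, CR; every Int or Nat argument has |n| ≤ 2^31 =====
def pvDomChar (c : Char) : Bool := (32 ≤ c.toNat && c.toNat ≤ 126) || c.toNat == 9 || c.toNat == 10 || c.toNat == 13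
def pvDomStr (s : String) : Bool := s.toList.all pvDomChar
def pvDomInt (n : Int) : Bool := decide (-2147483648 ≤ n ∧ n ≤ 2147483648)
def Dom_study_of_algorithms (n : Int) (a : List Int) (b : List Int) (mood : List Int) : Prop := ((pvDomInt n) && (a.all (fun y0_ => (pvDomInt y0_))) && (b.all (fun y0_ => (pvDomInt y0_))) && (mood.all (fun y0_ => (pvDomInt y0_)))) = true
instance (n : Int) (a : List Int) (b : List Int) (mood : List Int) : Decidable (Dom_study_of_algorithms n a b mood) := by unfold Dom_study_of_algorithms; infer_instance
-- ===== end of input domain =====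

-- B replaces A's two persistent skip-pointers by a stateless rescan of the relevant
-- presorted list from the start each day (objective: alternative, no speed claim).

-- ===== PORT A =====
-- the 'while idx < n and lst[idx][0] in studied' loop; idx is a nonnegative Python int,
-- so 'idx < n' is exactly 'idx < n.toNat'
def pvSkip (lst : List (Int × Int × Int)) (st : PySem.Set Int) (nn : Nat) (idx : Nat) : Nat :=
  if h : idx < nn ∧ (PySem.List.pyGetD lst (idx : Int) (0, 0, 0)).1 ∈ st then
    pvSkip lst st nn (idx + 1)
  else idx
termination_by nn - idx
decreasing_by omega

-- A's 'for mood_today in mood' loop: state (interest_index, usefulness_index, studied, result).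
-- 'lst[idx]' is pyGetD; Pre_ keeps the index in range wherever Python does not raise IndexError.
def pvALoop (isort usort : List (Int × Int × Int)) (nn : Nat) :
    List Int → Nat → Nat → PySem.Set Int → List Int → List Int
  | [], _, _, _, res => res
  | m :: ms, ii, ui, st, res =>
    if m == 1 then
      let ui' := pvSkip usort st nn ui
      let cur := PySem.List.pyGetD usort (ui' : Int) (0, 0, 0)
      pvALoop isort usort nn ms ii (ui' + 1) (PySem.Set.add st cur.1) (res ++ [cur.1])
    else
      let ii' := pvSkip isort st nn ii
      let cur := PySem.List.pyGetD isort (ii' : Int) (0, 0, 0)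
      pvALoop isort usort nn ms (ii' + 1) ui (PySem.Set.add st cur.1) (res ++ [cur.1])

-- sorted(xs, key=lambda x: (k1, k2, k3)): lexicographic 3-key sort, encoded as the stable
-- sort by k1 of the stable sorted2 by (k2, k3) — exact, since PySem.List.sorted is stable
def study_of_algorithms (n : Int) (a : List Int) (b : List Int) (mood : List Int) : List Int :=
  let algorithms := (PySem.List.pyRange 0 n 1).map
    (fun i => (i + 1, PySem.List.pyGetD a i 0, PySem.List.pyGetD b i 0))
  let interest_sorted :=
    PySem.List.sorted (PySem.List.sorted2 algorithms (fun x => -(x.2.2)) (fun x => x.1))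
      (fun x => -(x.2.1))
  let usefulness_sorted :=
    PySem.List.sorted (PySem.List.sorted2 algorithms (fun x => -(x.2.1)) (fun x => x.1))
      (fun x => -(x.2.2))
  pvALoop interest_sorted usefulness_sorted n.toNat mood 0 0 PySem.Set.empty []

-- ===== PORT B =====
-- B's 'next(t for t in lst if t[0] not in studied)': a scan from the start; Python raises
-- StopIteration when every element is studied — Pre_ excludes that, getD supplies the value there
def pvBLoop (isort usort : List (Int × Int × Int)) :
    List Int → PySem.Set Int → List Int → List Int
  | [], _, res => res
  | m :: ms, st, res =>
    let lst := if m == 1 then usort else isort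
    let pick := (lst.find? (fun t => !(PySem.Set.contains st t.1))).getD (0, 0, 0)
    pvBLoop isort usort ms (PySem.Set.add st pick.1) (res ++ [pick.1])

def study_of_algorithms_alt (n : Int) (a : List Int) (b : List Int) (mood : List Int) : List Int :=
  let algorithms := (PySem.List.pyRange 0 n 1).map
    (fun i => (i + 1, PySem.List.pyGetD a i 0, PySem.List.pyGetD b i 0))
  let by_interest :=
    PySem.List.sorted (PySem.List.sorted2 algorithms (fun x => -(x.2.2)) (fun x => x.1))
      (fun x => -(x.2.1))
  let by_usefulness :=
    PySem.List.sorted (PySem.List.sorted2 algorithms (fun x => -(x.2.1)) (fun x => x.1))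
      (fun x => -(x.2.2))
  pvBLoop by_interest by_usefulness mood PySem.Set.empty []

-- ===== PRECONDITION & SPEC =====
-- exactly where Python A returns: a and b long enough for a[i], b[i] (i < n), and no more
-- mood days than algorithms (otherwise the exhausted-list lookup raises IndexError)
def Pre_study_of_algorithms (n : Int) (a : List Int) (b : List Int) (mood : List Int) : Prop :=
  n ≤ (a.length : Int) ∧ n ≤ (b.length : Int) ∧ (mood.length : Int) ≤ max n 0
instance (n : Int) (a : List Int) (b : List Int) (mood : List Int) : Decidable (Pre_study_of_algorithms n a b mood) := by unfold Pre_study_of_algorithms; infer_instance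

def pvWitness_study_of_algorithms : Int × List Int × List Int × List Int :=
  (3, [2, 5, 2], [4, 1, 4], [0, 1, 0])

def Spec_study_of_algorithms (n : Int) (a : List Int) (b : List Int) (mood : List Int) (out : List Int) : Prop := out = study_of_algorithms_alt n a b mood
instance (n : Int) (a : List Int) (b : List Int) (mood : List Int) (out : List Int) : Decidable (Spec_study_of_algorithms n a b mood out) := by unfold Spec_study_of_algorithms; infer_instance

-- ===== CLAIM (what is proved, stated in full; the proofs are below) =====
def Claim_equal_study_of_algorithms : Prop := ∀ (n : Int) (a : List Int) (b : List Int) (mood : List Int), Dom_study_of_algorithms n a b mood → Pre_study_of_algorithms n a b mood → Spec_study_of_algorithms n a b mood (study_of_algorithms n a b mood)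

-- ===== LEMMAS AND PROOFS =====

theorem pvGetAt (lst : List (Int × Int × Int)) (j : Nat) (hlt : j < lst.length) :
    PySem.List.pyGetD lst ((j : Nat) : Int) (0, 0, 0) = lst[j] := by
  rw [PySem.List.pyGetD_natCast]
  exact List.getD_eq_getElem _ _ hlt

theorem pvGetPast (lst : List (Int × Int × Int)) (j : Nat) (hge : lst.length ≤ j) :
    PySem.List.pyGetD lst ((j : Nat) : Int) (0, 0, 0) = (0, 0, 0) := by
  rw [PySem.List.pyGetD_natCast]
  exact List.getD_eq_default _ _ hge

-- where the skip loop stops, A's lookup is the first unstudied element of the list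
theorem pvFound (lst : List (Int × Int × Int)) (st : PySem.Set Int) (idx : Nat)
    (hinv : ∀ t ∈ lst.take idx, t.1 ∈ st)
    (hstop : ¬ (idx < lst.length ∧ (PySem.List.pyGetD lst ((idx : Nat) : Int) (0, 0, 0)).1 ∈ st)) :
    PySem.List.pyGetD lst ((idx : Nat) : Int) (0, 0, 0)
      = (lst.find? (fun t => !(PySem.Set.contains st t.1))).getD (0, 0, 0) := by
  rcases Nat.lt_or_ge idx lst.length with hlt | hge
  · have hns : lst[idx].1 ∉ st := by
      intro hmem
      exact hstop ⟨hlt, by rw [pvGetAt lst idx hlt]; exact hmem⟩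
    rw [pvGetAt lst idx hlt]
    conv_rhs => rw [← List.take_append_drop idx lst]
    rw [List.find?_append, List.drop_eq_getElem_cons hlt, List.find?_cons]
    have h1 : (lst.take idx).find? (fun t => !(PySem.Set.contains st t.1)) = none := by
      rw [List.find?_eq_none]
      intro t ht
      simp
      exact hinv t ht
    have h2 : (!(PySem.Set.contains st (lst[idx]).1)) = true := by
      simp
      exact hns
    rw [h2, h1]
    rfl
  · have hn : lst.find? (fun t => !(PySem.Set.contains st t.1)) = none := by
      rw [List.find?_eq_none]
      intro t ht
      have htk : t ∈ lst.take idx := by rw [List.take_of_length_le hge]; exact ht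
      simp
      exact hinv t htk
    rw [pvGetPast lst idx hge, hn]
    rfl

theorem pvSkip_spec_aux (lst : List (Int × Int × Int)) (st : PySem.Set Int) (nn : Nat)
    (hlen : lst.length = nn) :
    ∀ (k idx : Nat), nn - idx ≤ k → (∀ t ∈ lst.take idx, t.1 ∈ st) →
    PySem.List.pyGetD lst ((pvSkip lst st nn idx : Nat) : Int) (0, 0, 0)
        = (lst.find? (fun t => !(PySem.Set.contains st t.1))).getD (0, 0, 0)
      ∧ (∀ t ∈ lst.take (pvSkip lst st nn idx), t.1 ∈ st) := by
  intro k
  induction k with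
  | zero =>
    intro idx hk hinv
    have hge : ¬ (idx < nn ∧ (PySem.List.pyGetD lst ((idx : Nat) : Int) (0, 0, 0)).1 ∈ st) := by
      intro h; omega
    rw [pvSkip, dif_neg hge]
    exact ⟨pvFound lst st idx hinv (by rw [hlen]; exact hge), hinv⟩
  | succ k ihk =>
    intro idx hk hinv
    rw [pvSkip]
    by_cases h : idx < nn ∧ (PySem.List.pyGetD lst ((idx : Nat) : Int) (0, 0, 0)).1 ∈ st
    · rw [dif_pos h]
      apply ihk (idx + 1) (by omega)
      intro t ht
      rw [List.take_add_one] at ht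
      rcases List.mem_append.1 ht with h1 | h2
      · exact hinv t h1
      · have hlt : idx < lst.length := by omega
        rw [List.getElem?_eq_getElem hlt] at h2
        simp only [Option.toList_some, List.mem_singleton] at h2
        subst h2
        rw [pvGetAt lst idx hlt] at h
        exact h.2
    · rw [dif_neg h]
      exact ⟨pvFound lst st idx hinv (by rw [hlen]; exact h), hinv⟩

theorem pvSkip_spec (lst : List (Int × Int × Int)) (st : PySem.Set Int) (nn idx : Nat)
    (hlen : lst.length = nn) (hinv : ∀ t ∈ lst.take idx, t.1 ∈ st) :
    PySem.List.pyGetD lst ((pvSkip lst st nn idx : Nat) : Int) (0, 0, 0)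
        = (lst.find? (fun t => !(PySem.Set.contains st t.1))).getD (0, 0, 0)
      ∧ (∀ t ∈ lst.take (pvSkip lst st nn idx), t.1 ∈ st) :=
  pvSkip_spec_aux lst st nn hlen (nn - idx) idx (le_refl _) hinv

-- adding the picked id preserves the studied-prefix invariant one step further
theorem pvStep_inv (lst : List (Int × Int × Int)) (st : PySem.Set Int) (j : Nat)
    (hinv : ∀ t ∈ lst.take j, t.1 ∈ st) :
    ∀ t ∈ lst.take (j + 1), t.1 ∈ PySem.Set.add st (PySem.List.pyGetD lst ((j : Nat) : Int) (0, 0, 0)).1 := by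
  intro t ht
  rw [List.take_add_one] at ht
  rcases List.mem_append.1 ht with h1 | h2
  · exact (PySem.Set.mem_add _ _ _).2 (Or.inl (hinv t h1))
  · rcases Nat.lt_or_ge j lst.length with hlt | hge
    · rw [List.getElem?_eq_getElem hlt] at h2
      simp only [Option.toList_some, List.mem_singleton] at h2
      subst h2
      rw [pvGetAt lst j hlt]
      exact (PySem.Set.mem_add _ _ _).2 (Or.inr rfl)
    · rw [List.getElem?_eq_none hge] at h2
      simp at h2

theorem pvLoop_eq (isort usort : List (Int × Int × Int)) (nn : Nat)
    (hi : isort.length = nn) (hu : usort.length = nn) :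
    ∀ (mood : List Int) (ii ui : Nat) (st : PySem.Set Int) (res : List Int),
      (∀ t ∈ isort.take ii, t.1 ∈ st) → (∀ t ∈ usort.take ui, t.1 ∈ st) →
      pvALoop isort usort nn mood ii ui st res = pvBLoop isort usort mood st res := by
  intro mood
  induction mood with
  | nil => intro ii ui st res _ _; rfl
  | cons m ms ih =>
    intro ii ui st res hii hui
    by_cases hm : m = 1
    · obtain ⟨heq, hinv'⟩ := pvSkip_spec usort st nn ui hu hui
      simp only [pvALoop, pvBLoop, hm, beq_self_eq_true, if_true]
      rw [heq]
      apply ih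
      · intro t ht
        exact (PySem.Set.mem_add _ _ _).2 (Or.inl (hii t ht))
      · rw [← heq]; exact pvStep_inv usort st _ hinv'
    · obtain ⟨heq, hinv'⟩ := pvSkip_spec isort st nn ii hi hii
      have hm' : (m == 1) = false := by simp [hm]
      simp only [pvALoop, pvBLoop, hm']
      rw [heq]
      apply ih
      · rw [← heq]; exact pvStep_inv isort st _ hinv'
      · intro t ht
        exact (PySem.Set.mem_add _ _ _).2 (Or.inl (hui t ht))

-- ===== VERDICT (by name: the statement is the Claim_ definition above) =====
theorem study_of_algorithms_spec : Claim_equal_study_of_algorithms := by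
  unfold Claim_equal_study_of_algorithms
  intro n a b mood _ _
  unfold Spec_study_of_algorithms study_of_algorithms study_of_algorithms_alt
  apply pvLoop_eq _ _ n.toNat ?_ ?_ mood 0 0 PySem.Set.empty [] (by simp) (by simp)
  · rw [(PySem.List.sorted_perm ..).length_eq, (PySem.List.sorted2_perm ..).length_eq,
      List.length_map, PySem.List.length_pyRange_one]
    simp
  · rw [(PySem.List.sorted_perm ..).length_eq, (PySem.List.sorted2_perm ..).length_eq,
      List.length_map, PySem.List.length_pyRange_one]
    simp
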